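-- pv_equiv track=rewrite | github.com/andresroliveira/DistanceGeometry | Symmetry/EncontraCaminhos.py | EncontraCaminhos
-- ===== SOURCE A (Python) =====
-- import copy
--
-- def TrocaSinal(s, piv):
-- 	t = copy.deepcopy(s)
--
-- 	for i in range(piv, len(t)):
-- 		t[i] = 1 - t[i]
--
-- 	return t
--
-- def EncontraCaminhos(sol, S):
--         tree = [0 for _ in range(2**(len(S) + 1))]
--         tree[1] = copy.deepcopy(sol)
--
--         piv = 0
--         k = 0
--         for i in range(1, 2**len(S)):
--                 if 2**k == i:
--                         piv = S[k]
--                         k += 1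
--                 tree[2*i] = copy.deepcopy(tree[i])
--                 tree[2*i + 1] = copy.deepcopy(TrocaSinal(tree[i], piv))
--
--         return tree[2**len(S):2**(len(S)+1)]
-- ===== SOURCE B (Python) =====
-- def EncontraCaminhos(sol, S):
--     # Enumerate the 2**len(S) leaves directly: leaf m corresponds to the
--     # binary choices of m read MSB-first (bit n-1-k selects pivot S[k]);
--     # position j of the leaf is flipped iff an odd number of its chosen
--     # pivots p satisfy p <= j.
--     n = len(S)
--     out = []
--     for m in range(2 ** n):
--         chosen = [S[k] for k in range(n) if (m >> (n - 1 - k)) & 1]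
--         out.append([1 - x if sum(1 for p in chosen if p <= j) % 2 == 1 else x
--                     for j, x in enumerate(sol)])
--     return out
-- ===== Notes on version B (the rewrite author's own statement) =====
-- stated objective: simpler
-- what changed: B drops the 2^(n+1)-slot heap array and the pivot/level bookkeeping entirely and enumerates the 2^n leaves directly, computing each position of leaf m by the parity of its chosen pivots <= that position (bit n-1-k of m selects pivot S[k]).
-- intended difference: On inputs where some pivot in S is negative (and >= -len(sol), else A raises), A's in-place loop 't[i] = 1 - t[i]' over range(piv, len) hits each tail position twice via Python negative-index wraparound, so A effectively flips only the prefix [0, len+piv); B flips every position >= piv, i.e. the whole list, which is the intended 'flip from the pivot onward' sign change. — e.g. on EncontraCaminhos([0, 1], [-1]): A returns [[0, 1], [1, 1]], B returns [[0, 1], [1, 0]]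
-- outside the precondition, e.g. on EncontraCaminhos([0, 1], [-3]): A raises IndexError, B returns [[0, 1], [1, 0]]
import Mathlib
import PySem

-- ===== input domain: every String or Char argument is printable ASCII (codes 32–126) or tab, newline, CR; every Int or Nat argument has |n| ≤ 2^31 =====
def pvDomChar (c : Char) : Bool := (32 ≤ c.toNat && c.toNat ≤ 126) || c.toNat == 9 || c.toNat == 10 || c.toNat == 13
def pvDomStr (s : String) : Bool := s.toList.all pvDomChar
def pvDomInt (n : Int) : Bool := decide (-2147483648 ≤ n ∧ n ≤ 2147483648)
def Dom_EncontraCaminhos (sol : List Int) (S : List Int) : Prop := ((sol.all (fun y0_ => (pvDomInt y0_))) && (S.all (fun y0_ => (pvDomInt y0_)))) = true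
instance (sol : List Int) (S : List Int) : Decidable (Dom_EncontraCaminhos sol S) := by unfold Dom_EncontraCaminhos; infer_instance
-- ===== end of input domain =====

-- B replaces A's 2^(n+1)-slot heap array and pivot/level bookkeeping by directly
-- enumerating the 2^n leaves, computing each leaf position by flip parity (objective: simpler).

-- ===== PORT A =====
-- 't[i] = 1 - t[i]' with a possibly negative index i: Python normalises i < 0 to i + len;
-- an index still out of range raises IndexError (excluded by Pre_), here it leaves t unchanged.
def pySetFlip (t : List Int) (i : Int) : List Int :=
  let j : Int := if i < 0 then i + (t.length : Int) else i
  if 0 ≤ j ∧ j < (t.length : Int) then t.set j.toNat (1 - t.getD j.toNat 0) else t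

-- TrocaSinal(s, piv): t = deepcopy(s); for i in range(piv, len(t)): t[i] = 1 - t[i]; return t
def TrocaSinal (s : List Int) (piv : Int) : List Int :=
  (PySem.List.pyRange piv (s.length : Int) 1).foldl pySetFlip s

-- one iteration of A's loop body over the state (tree, piv, k)
def stepA (S : List Int) (st : List (List Int) × Int × Nat) (i : Int) :
    List (List Int) × Int × Nat :=
  let tree := st.1
  let pk : Int × Nat :=
    if (2 : Int) ^ st.2.2 = i then (PySem.List.pyGetD S (st.2.2 : Int) 0, st.2.2 + 1) else st.2
  let ti := PySem.List.pyGetD tree i []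
  (((tree.set (2 * i).toNat ti).set (2 * i + 1).toNat (TrocaSinal ti pk.1)), pk)

def EncontraCaminhos (sol : List Int) (S : List Int) : List (List Int) :=
  let n := S.length
  -- tree = [0 for _ in range(2**(n+1))]: the integer placeholders are never read back; [] stands in for 0
  let tree0 : List (List Int) := (List.range (2 ^ (n + 1))).map (fun _ => ([] : List Int))
  -- tree[1] = deepcopy(sol)
  let tree1 := tree0.set 1 sol
  -- piv = 0; k = 0; for i in range(1, 2**n): …
  let st := (PySem.List.pyRange 1 ((2 ^ n : Nat) : Int) 1).foldl (stepA S) (tree1, (0 : Int), 0)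
  -- return tree[2**n : 2**(n+1)]
  PySem.List.slice st.1 (some ((2 ^ n : Nat) : Int)) (some ((2 ^ (n + 1) : Nat) : Int))

-- ===== PORT B =====
def EncontraCaminhos_alt (sol : List Int) (S : List Int) : List (List Int) :=
  let n := S.length
  (List.range (2 ^ n)).map (fun m =>
    -- chosen = [S[k] for k in range(n) if (m >> (n - 1 - k)) & 1]   (k < n, so S[k] is in range)
    let chosen := (List.range n).filterMap (fun k =>
      if (m >>> (n - 1 - k)) &&& 1 = 1 then some (PySem.List.pyGetD S (k : Int) 0) else none)
    -- [1 - x if sum(1 for p in chosen if p <= j) % 2 == 1 else x for j, x in enumerate(sol)]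
    (PySem.List.enumerate sol 0).map (fun jx =>
      if chosen.countP (fun p => p ≤ jx.1) % 2 = 1 then 1 - jx.2 else jx.2))

-- ===== PRECONDITION & SPEC =====
-- Pre_ excludes exactly the pivots p < -len(sol), on which TrocaSinal's 't[i]' raises IndexError.
def Pre_EncontraCaminhos (sol : List Int) (S : List Int) : Prop :=
  ∀ p ∈ S, -(sol.length : Int) ≤ p
instance (sol : List Int) (S : List Int) : Decidable (Pre_EncontraCaminhos sol S) := by
  unfold Pre_EncontraCaminhos; infer_instance
def pvWitness_EncontraCaminhos : List Int × List Int := ([0, 1], [1])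

-- On inputs where some pivot in S is negative, A's in-place flip loop hits each tail position
-- twice via negative-index wraparound and so flips only the prefix [0, len+piv); B flips every
-- position ≥ piv, i.e. the whole list, which is the intended 'flip from the pivot onward'.
def D_EncontraCaminhos (sol : List Int) (S : List Int) : Prop := ∃ p ∈ S, p < 0
instance (sol : List Int) (S : List Int) : Decidable (D_EncontraCaminhos sol S) := by
  unfold D_EncontraCaminhos; infer_instance

def Spec_EncontraCaminhos (sol : List Int) (S : List Int) (out : List (List Int)) : Prop :=
  ¬ D_EncontraCaminhos sol S → out = EncontraCaminhos_alt sol S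
instance (sol : List Int) (S : List Int) (out : List (List Int)) :
    Decidable (Spec_EncontraCaminhos sol S out) := by unfold Spec_EncontraCaminhos; infer_instance

def pvDiffWitness_EncontraCaminhos : List Int × List Int := ([0, 1], [-1])
def pvDiffWitnessOut_EncontraCaminhos : (List (List Int)) × (List (List Int)) :=
  ([[0, 1], [1, 1]], [[0, 1], [1, 0]])

-- ===== CLAIM (what is proved, stated in full; the proofs are below) =====
def Claim_unchanged_EncontraCaminhos : Prop := ∀ (sol : List Int) (S : List Int), Dom_EncontraCaminhos sol S → Pre_EncontraCaminhos sol S → Spec_EncontraCaminhos sol S (EncontraCaminhos sol S)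
def Claim_changed_EncontraCaminhos : Prop := Dom_EncontraCaminhos (pvDiffWitness_EncontraCaminhos.1) (pvDiffWitness_EncontraCaminhos.2) ∧ Pre_EncontraCaminhos (pvDiffWitness_EncontraCaminhos.1) (pvDiffWitness_EncontraCaminhos.2) ∧ D_EncontraCaminhos (pvDiffWitness_EncontraCaminhos.1) (pvDiffWitness_EncontraCaminhos.2) ∧ EncontraCaminhos (pvDiffWitness_EncontraCaminhos.1) (pvDiffWitness_EncontraCaminhos.2) = pvDiffWitnessOut_EncontraCaminhos.1 ∧ EncontraCaminhos_alt (pvDiffWitness_EncontraCaminhos.1) (pvDiffWitness_EncontraCaminhos.2) = pvDiffWitnessOut_EncontraCaminhos.2 ∧ pvDiffWitnessOut_EncontraCaminhos.1 ≠ pvDiffWitnessOut_EncontraCaminhos.2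

-- ===== LEMMAS AND PROOFS =====

-- pointwise characterisation of a non-negative-pivot sign flip
def flipGE (p : Int) (t : List Int) : List Int :=
  t.mapIdx fun j x => if p ≤ (j : Int) then 1 - x else x

-- a leaf of B: flip position j iff an odd number of pivots p in ps satisfy p ≤ j
def leafB (sol : List Int) (ps : List Int) : List Int :=
  sol.mapIdx fun j x => if ps.countP (fun p => p ≤ (j : Int)) % 2 = 1 then 1 - x else x

-- the pivots B chooses for leaf m of an n-level tree
def chosenL (S : List Int) (n m : Nat) : List Int :=
  (List.range n).filterMap fun k =>
    if (m >>> (n - 1 - k)) &&& 1 = 1 then some (S.getD k 0) else none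

-- value A's loop stores at heap node j
def pathLeaf (sol S : List Int) (j : Nat) : List Int :=
  if j < 2 then sol
  else if j % 2 = 1 then TrocaSinal (pathLeaf sol S (j / 2)) (S.getD (Nat.log2 (j / 2)) 0)
  else pathLeaf sol S (j / 2)
termination_by j
decreasing_by all_goals omega

theorem foldl_pySetFlip (d : Nat) : ∀ (t : List Int) (a : Nat), t.length - a = d →
    (PySem.List.pyRange (a : Int) (t.length : Int) 1).foldl pySetFlip t
      = t.mapIdx (fun j x => if a ≤ j then 1 - x else x) := by
  induction d with
  | zero =>
    intro t a h
    rw [PySem.List.pyRange_one_eq_nil (by exact_mod_cast (show t.length ≤ a by omega))]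
    simp only [List.foldl_nil]
    apply List.ext_getElem (by simp)
    intro i h1 h2
    rw [List.getElem_mapIdx]
    simp [show ¬ a ≤ i by omega]
  | succ d ih =>
    intro t a h
    have hlt : a < t.length := by omega
    rw [PySem.List.pyRange_one_cons (by exact_mod_cast hlt)]
    simp only [List.foldl_cons]
    have hstep : pySetFlip t (a : Int) = t.set a (1 - t.getD a 0) := by
      have hc1 : ¬ ((a : Int) < 0) := by omega
      have hc2 : (0 : Int) ≤ (a : Int) ∧ (a : Int) < (t.length : Int) := ⟨by omega, by exact_mod_cast hlt⟩
      simp [pySetFlip, hc1, hc2, hlt]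
    rw [hstep]
    have hlen : (t.set a (1 - t.getD a 0)).length = t.length := by simp
    rw [show ((a : Int) + 1) = ((a + 1 : Nat) : Int) by push_cast; ring, ← hlen,
      ih _ (a + 1) (by simp; omega)]
    apply List.ext_getElem (by simp)
    intro i h1 h2
    rw [List.getElem_mapIdx, List.getElem_mapIdx, List.getElem_set]
    rcases lt_trichotomy i a with hia | hia | hia
    · simp [show a ≠ i by omega, show ¬ a + 1 ≤ i by omega, show ¬ a ≤ i by omega]
    · subst hia
      simp [show ¬ i + 1 ≤ i by omega, List.getElem?_eq_getElem hlt]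
    · simp [show a ≠ i by omega, show a + 1 ≤ i by omega, show a ≤ i by omega]

theorem troca_eq_flipGE (t : List Int) (p : Int) (hp : 0 ≤ p) :
    TrocaSinal t p = flipGE p t := by
  unfold TrocaSinal flipGE
  rw [show p = ((p.toNat : Nat) : Int) from (Int.toNat_of_nonneg hp).symm,
    foldl_pySetFlip (t.length - p.toNat) t p.toNat rfl]
  apply List.ext_getElem (by simp)
  intro i h1 h2
  rw [List.getElem_mapIdx, List.getElem_mapIdx]
  split_ifs <;> first | rfl | omega

theorem leafB_nil (sol : List Int) : leafB sol [] = sol := by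
  apply List.ext_getElem (by simp [leafB])
  intro i h1 h2
  simp [leafB]

theorem flipGE_leafB (p : Int) (sol ps : List Int) :
    flipGE p (leafB sol ps) = leafB sol (p :: ps) := by
  apply List.ext_getElem (by simp [flipGE, leafB])
  intro i h1 h2
  simp only [flipGE, leafB, List.getElem_mapIdx, List.countP_cons]
  rcases Nat.mod_two_eq_zero_or_one (List.countP (fun p => decide (p ≤ (i : Int))) ps) with h | h <;>
    by_cases hpi : p ≤ (i : Int) <;>
      simp [hpi, h, Nat.add_mod]

theorem leafB_append_singleton (sol ps : List Int) (p : Int) :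
    leafB sol (ps ++ [p]) = leafB sol (p :: ps) := by
  apply List.ext_getElem (by simp [leafB])
  intro i h1 h2
  simp only [leafB, List.getElem_mapIdx, List.countP_append, List.countP_cons,
    List.countP_nil]
  rcases Nat.mod_two_eq_zero_or_one (List.countP (fun p => decide (p ≤ (i : Int))) ps) with h | h <;>
    by_cases hpi : p ≤ (i : Int) <;>
      simp [hpi, h, Nat.add_mod]

theorem chosenL_succ (S : List Int) (n m : Nat) :
    chosenL S (n + 1) m
      = chosenL S n (m / 2) ++ (if m % 2 = 1 then [S.getD n 0] else []) := by
  unfold chosenL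
  rw [List.range_succ, List.filterMap_append]
  congr 1
  · apply List.filterMap_congr
    intro k hk
    have hkn : k < n := List.mem_range.mp hk
    have hshift : m >>> (n + 1 - 1 - k) = (m / 2) >>> (n - 1 - k) := by
      rw [Nat.shiftRight_eq_div_pow, Nat.shiftRight_eq_div_pow]
      have h1 : n + 1 - 1 - k = (n - 1 - k) + 1 := by omega
      rw [h1, pow_succ, Nat.div_div_eq_div_mul, Nat.mul_comm, ← Nat.div_div_eq_div_mul]
    rw [hshift]
  · simp only [List.filterMap_cons, List.filterMap_nil]
    have h0 : n + 1 - 1 - n = 0 := by omega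
    rw [h0]
    simp only [Nat.shiftRight_zero, Nat.and_one_is_mod]
    by_cases h : m % 2 = 1 <;> simp [h]

theorem getD_set_ne (l : List (List Int)) (i j : Nat) (v : List Int) (h : i ≠ j) :
    (l.set i v).getD j [] = l.getD j [] := by
  simp [List.getD, h]

theorem getD_set_self (l : List (List Int)) (i : Nat) (v : List Int) (h : i < l.length) :
    (l.set i v).getD i [] = v := by
  simp [List.getD, h]

theorem pathLeaf_eq_leafB (sol S : List Int) (hS : ∀ i, 0 ≤ S.getD i 0) :
    ∀ n m, m < 2 ^ n → pathLeaf sol S (2 ^ n + m) = leafB sol (chosenL S n m) := by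
  intro n
  induction n with
  | zero =>
    intro m hm
    have hm0 : m = 0 := by omega
    subst hm0
    rw [pathLeaf]
    simp [chosenL, leafB_nil]
  | succ n ih =>
    intro m hm
    have hp1 : 1 ≤ 2 ^ n := Nat.one_le_two_pow
    have h2 : 2 ^ (n + 1) = 2 * 2 ^ n := by rw [pow_succ]; ring
    have hj2 : (2 ^ (n + 1) + m) / 2 = 2 ^ n + m / 2 := by omega
    have hjm : (2 ^ (n + 1) + m) % 2 = m % 2 := by omega
    have hlog : Nat.log2 (2 ^ n + m / 2) = n := by
      rw [Nat.log2_eq_log_two]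
      exact Nat.log_eq_of_pow_le_of_lt_pow (by omega) (by omega)
    rw [pathLeaf, if_neg (by omega : ¬ (2 ^ (n + 1) + m < 2)), hj2, hjm, hlog,
      ih (m / 2) (by omega), chosenL_succ]
    by_cases hodd : m % 2 = 1
    · rw [if_pos hodd, if_pos hodd, leafB_append_singleton, ← flipGE_leafB,
        troca_eq_flipGE _ _ (hS n)]
    · rw [if_neg hodd, if_neg hodd, List.append_nil]

-- loop invariant for A's fold
def treeInv (sol S : List Int) (n m : Nat) (st : List (List Int) × Int × Nat) : Prop :=
  st.2.1 = S.getD (Nat.log2 m) 0 ∧ st.2.2 = Nat.log2 m + 1 ∧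
  st.1.length = 2 ^ (n + 1) ∧
  ∀ j : Nat, 1 ≤ j → j ≤ 2 * m + 1 → st.1.getD j [] = pathLeaf sol S j

theorem fold_inv (sol S : List Int) (n : Nat) (m : Nat) (h1 : 1 ≤ m) (hm : m ≤ 2 ^ n - 1) :
    treeInv sol S n m
      ((PySem.List.pyRange 1 ((m : Int) + 1) 1).foldl (stepA S)
        (((List.range (2 ^ (n + 1))).map (fun _ => ([] : List Int))).set 1 sol, (0 : Int), 0)) := by
  induction m with
  | zero => omega
  | succ m ih =>
    have hp1 : 1 ≤ 2 ^ n := Nat.one_le_two_pow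
    have h2 : 2 ^ (n + 1) = 2 * 2 ^ n := by rw [pow_succ]; ring
    have hlen0 : (((List.range (2 ^ (n + 1))).map (fun _ => ([] : List Int))).set 1 sol).length
        = 2 ^ (n + 1) := by simp
    have hP1 : pathLeaf sol S 1 = sol := by rw [pathLeaf]; norm_num
    have hP2 : pathLeaf sol S 2 = sol := by
      rw [pathLeaf]; norm_num [hP1]
    have hP3 : pathLeaf sol S 3 = TrocaSinal sol (S.getD 0 0) := by
      rw [pathLeaf]; norm_num [show Nat.log2 1 = 0 by decide, hP1]
    rcases Nat.eq_or_lt_of_le h1 with hbase | hstep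
    · -- base case m + 1 = 1
      have hm1 : m = 0 := by omega
      subst hm1
      have h4 : 4 ≤ 2 ^ (n + 1) := by omega
      rw [show ((0 + 1 : Nat) : Int) + 1 = (1 : Int) + 1 by norm_num,
        PySem.List.pyRange_one_singleton]
      simp only [List.foldl_cons, List.foldl_nil]
      set tree1 := ((List.range (2 ^ (n + 1))).map (fun _ => ([] : List Int))).set 1 sol
        with htree1
      have hti : PySem.List.pyGetD tree1 (1 : Int) [] = sol := by
        rw [htree1, show (1 : Int) = ((1 : Nat) : Int) by norm_num, PySem.List.pyGetD_natCast]
        exact getD_set_self _ _ _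
          (by simp only [List.length_set, List.length_map, List.length_range]; omega)
      have hstep1 : stepA S (tree1, (0 : Int), 0) 1
          = ((tree1.set 2 sol).set 3 (TrocaSinal sol (PySem.List.pyGetD S (0 : Int) 0)),
             PySem.List.pyGetD S (0 : Int) 0, 1) := by
        unfold stepA
        norm_num [hti, show Int.toNat 2 = 2 from rfl, show Int.toNat 3 = 3 from rfl]
      rw [hstep1]
      refine ⟨?_, ?_, ?_, ?_⟩
      · simp [show Nat.log2 1 = 0 by decide, PySem.List.pyGetD_zero]
      · simp [show Nat.log2 1 = 0 by decide]
      · simp [htree1]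
      · intro j hj1 hj2
        interval_cases j
        · rw [getD_set_ne _ _ _ _ (by omega), getD_set_ne _ _ _ _ (by omega), htree1,
            getD_set_self _ _ _
              (by simp only [List.length_set, List.length_map, List.length_range]; omega), hP1]
        · rw [getD_set_ne _ _ _ _ (by omega),
            getD_set_self _ _ _
              (by simp only [htree1, List.length_set, List.length_map, List.length_range]
                  omega), hP2]
        · rw [getD_set_self _ _ _
              (by simp only [htree1, List.length_set, List.length_map, List.length_range]
                  omega), hP3,
            PySem.List.pyGetD_zero]
    · -- inductive step: 1 ≤ m
      have hm' : 1 ≤ m := by omega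
      obtain ⟨hpiv, hk, hlen, htree⟩ := ih hm' (by omega)
      have hsplit : PySem.List.pyRange 1 (((m + 1 : Nat) : Int) + 1) 1
          = PySem.List.pyRange 1 ((m : Int) + 1) 1 ++ [((m : Int) + 1)] := by
        rw [show (((m + 1 : Nat) : Int) + 1) = ((m : Int) + 1) + 1 by push_cast; ring]
        exact PySem.List.pyRange_one_succ_right (by omega)
      rw [hsplit, List.foldl_append, List.foldl_cons, List.foldl_nil]
      set st := (PySem.List.pyRange 1 ((m : Int) + 1) 1).foldl (stepA S)
        (((List.range (2 ^ (n + 1))).map (fun _ => ([] : List Int))).set 1 sol, (0 : Int), 0)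
        with hst
      have hlb : 2 ^ Nat.log2 m ≤ m := Nat.log2_self_le (by omega)
      have hub : m < 2 ^ (Nat.log2 m + 1) := Nat.lt_log2_self
      have hti : PySem.List.pyGetD st.1 ((m : Int) + 1) [] = pathLeaf sol S (m + 1) := by
        rw [show ((m : Int) + 1) = ((m + 1 : Nat) : Int) by push_cast; ring,
          PySem.List.pyGetD_natCast]
        exact htree (m + 1) (by omega) (by omega)
      have hidx1 : ((2 : Int) * ((m : Int) + 1)).toNat = 2 * m + 2 := by omega
      have hidx2 : ((2 : Int) * ((m : Int) + 1) + 1).toNat = 2 * m + 3 := by omega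
      unfold stepA
      simp only [hk, hti, hidx1, hidx2]
      have hcast : ((2 : Int) ^ (Nat.log2 m + 1) = (m : Int) + 1)
          ↔ (2 ^ (Nat.log2 m + 1) = m + 1) := by
        constructor <;> intro hh <;> [exact_mod_cast hh; exact_mod_cast congrArg (Nat.cast : Nat → Int) hh]
      have hbound : 2 * m + 3 < 2 ^ (n + 1) := by omega
      have hlog : 2 ^ (Nat.log2 m + 1) = m + 1 → Nat.log2 (m + 1) = Nat.log2 m + 1 := by
        intro hh
        rw [← hh, Nat.log2_eq_log_two]
        exact Nat.log_pow (by norm_num) _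
      have hlog' : ¬ 2 ^ (Nat.log2 m + 1) = m + 1 → Nat.log2 (m + 1) = Nat.log2 m := by
        intro hh
        rw [Nat.log2_eq_log_two]
        exact Nat.log_eq_of_pow_le_of_lt_pow (by omega) (by omega)
      by_cases hpow : 2 ^ (Nat.log2 m + 1) = m + 1
      · rw [if_pos (hcast.mpr hpow)]
        refine ⟨?_, ?_, ?_, ?_⟩
        · simp only [hlog hpow]
          rw [PySem.List.pyGetD_natCast]
        · simp [hlog hpow]
        · simp [hlen]
        · intro j hj1 hj2
          rcases (by omega : j ≤ 2 * m + 1 ∨ j = 2 * m + 2 ∨ j = 2 * m + 3) with hj | hj | hj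
          · rw [getD_set_ne _ _ _ _ (by omega), getD_set_ne _ _ _ _ (by omega)]
            exact htree j hj1 hj
          · subst hj
            rw [getD_set_ne _ _ _ _ (by omega),
              getD_set_self _ _ _ (by simp only [List.length_set, hlen]; omega)]
            rw [show pathLeaf sol S (2 * m + 2) = pathLeaf sol S (m + 1) from by
              rw [pathLeaf, if_neg (by omega), if_neg (by omega),
                show (2 * m + 2) / 2 = m + 1 by omega]]
          · subst hj
            rw [getD_set_self _ _ _ (by simp only [List.length_set, hlen]; omega)]
            rw [show pathLeaf sol S (2 * m + 3)
                = TrocaSinal (pathLeaf sol S (m + 1)) (S.getD (Nat.log2 (m + 1)) 0) from by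
              rw [pathLeaf, if_neg (by omega), if_pos (by omega),
                show (2 * m + 3) / 2 = m + 1 by omega],
              hlog hpow, PySem.List.pyGetD_natCast]
      · rw [if_neg (fun hh => hpow (hcast.mp hh))]
        refine ⟨?_, ?_, ?_, ?_⟩
        · simp [hlog' hpow, hpiv]
        · simp [hlog' hpow, hk]
        · simp [hlen]
        · intro j hj1 hj2
          rcases (by omega : j ≤ 2 * m + 1 ∨ j = 2 * m + 2 ∨ j = 2 * m + 3) with hj | hj | hj
          · rw [getD_set_ne _ _ _ _ (by omega), getD_set_ne _ _ _ _ (by omega)]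
            exact htree j hj1 hj
          · subst hj
            rw [getD_set_ne _ _ _ _ (by omega),
              getD_set_self _ _ _ (by simp only [List.length_set, hlen]; omega)]
            rw [show pathLeaf sol S (2 * m + 2) = pathLeaf sol S (m + 1) from by
              rw [pathLeaf, if_neg (by omega), if_neg (by omega),
                show (2 * m + 2) / 2 = m + 1 by omega]]
          · subst hj
            rw [getD_set_self _ _ _ (by simp only [List.length_set, hlen]; omega)]
            rw [show pathLeaf sol S (2 * m + 3)
                = TrocaSinal (pathLeaf sol S (m + 1)) (S.getD (Nat.log2 (m + 1)) 0) from by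
              rw [pathLeaf, if_neg (by omega), if_pos (by omega),
                show (2 * m + 3) / 2 = m + 1 by omega],
              hlog' hpow, hpiv]

theorem enum_map (sol : List Int) (g : Int × Int → Int) :
    (PySem.List.enumerate sol 0).map g = sol.mapIdx fun j x => g ((j : Int), x) := by
  apply List.ext_getElem (by simp)
  intro i h1 h2
  simp [PySem.List.getElem_enumerate, List.getElem_mapIdx]

theorem altB_eq (sol S : List Int) :
    EncontraCaminhos_alt sol S
      = (List.range (2 ^ S.length)).map (fun m => leafB sol (chosenL S S.length m)) := by
  unfold EncontraCaminhos_alt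
  simp only [PySem.List.pyGetD_natCast]
  refine congrArg (fun f => List.map f (List.range (2 ^ S.length))) ?_
  funext m
  rw [enum_map]
  rfl

-- ===== VERDICT (by name: the statement is the Claim_ definition above) =====
theorem A_eq (sol S : List Int) : EncontraCaminhos sol S =
    PySem.List.slice
      ((PySem.List.pyRange 1 ((2 ^ S.length : Nat) : Int) 1).foldl (stepA S)
        ((((List.range (2 ^ (S.length + 1))).map (fun _ => ([] : List Int))).set 1 sol),
          (0 : Int), 0)).1
      (some ((2 ^ S.length : Nat) : Int)) (some ((2 ^ (S.length + 1) : Nat) : Int)) := rfl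

theorem EncontraCaminhos_spec : Claim_unchanged_EncontraCaminhos := by
  intro sol S hDom hPre hD
  have hS : ∀ i, 0 ≤ S.getD i 0 := by
    intro i
    unfold D_EncontraCaminhos at hD
    push_neg at hD
    by_cases hi : i < S.length
    · rw [List.getD_eq_getElem S 0 hi]
      exact hD S[i] (List.getElem_mem hi)
    · rw [List.getD_eq_default S 0 (by omega)]
  show EncontraCaminhos sol S = EncontraCaminhos_alt sol S
  rw [altB_eq, A_eq]
  by_cases hn : S.length = 0
  · rw [hn]
    rw [PySem.List.pyRange_one_eq_nil (by norm_num)]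
    simp only [List.foldl_nil]
    norm_num [PySem.List.slice_natCast]
    rw [show ((List.replicate 2 ([] : List Int)).set 1 sol) = [[], sol] from rfl,
      show (1 : Int) = ((1 : Nat) : Int) by norm_num,
      show (2 : Int) = ((2 : Nat) : Int) by norm_num, PySem.List.slice_natCast]
    simp [chosenL, leafB_nil]
  · have hn1 : 1 ≤ S.length := by omega
    set n := S.length with hnn
    have hp1 : 1 ≤ 2 ^ n := Nat.one_le_two_pow
    have hp2 : 2 ≤ 2 ^ n := by
      calc 2 = 2 ^ 1 := by norm_num
      _ ≤ 2 ^ n := Nat.pow_le_pow_right (by norm_num) hn1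
    have h2 : 2 ^ (n + 1) = 2 * 2 ^ n := by rw [pow_succ]; ring
    have hcast : ((2 ^ n : Nat) : Int) = (((2 ^ n - 1 : Nat) : Int)) + 1 := by
      have : (2 ^ n - 1) + 1 = 2 ^ n := by omega
      rw [← this]; push_cast; ring
    rw [PySem.List.slice_natCast, hcast]
    obtain ⟨_, _, hlen, htree⟩ :=
      fold_inv sol S n (2 ^ n - 1) (by omega) le_rfl
    set st := (PySem.List.pyRange 1 (((2 ^ n - 1 : Nat) : Int) + 1) 1).foldl (stepA S)
      (((List.range (2 ^ (n + 1))).map (fun _ => ([] : List Int))).set 1 sol, (0 : Int), 0)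
      with hst
    apply List.ext_getElem
    · simp [hlen]; omega
    · intro k hk1 hk2
      have hkn : k < 2 ^ n := by simp [hlen] at hk1; omega
      rw [List.getElem_take, List.getElem_drop, List.getElem_map, List.getElem_range]
      rw [← List.getD_eq_getElem st.1 [] (by omega : 2 ^ n + k < st.1.length)]
      rw [htree (2 ^ n + k) (by omega) (by omega)]
      exact pathLeaf_eq_leafB sol S hS n k hkn

theorem EncontraCaminhos_changed : Claim_changed_EncontraCaminhos := by
  unfold Claim_changed_EncontraCaminhos; decide
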